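-- pv_equiv track=rewrite | github.com/archd3mon/marg | pump/backend/app/network/graph.py | _count_transfers
-- ===== SOURCE A (Python) =====
-- def _count_transfers(legs):
--     transfers = 0
--     if not legs: return 0
--
--     current_mode = legs[0]['mode']
--     for leg in legs[1:]:
--         # We only count structural transit changes as transfers
--         # Moving from Bus to Bus without a walk might not happen cleanly in our heuristic graph
--         # so we define transfer as a mode switch.
--         if leg['mode'] != current_mode and current_mode != 'walk':
--             if leg['mode'] in ['bus', 'metro']:
--                 transfers += 1
--         current_mode = leg['mode']
--     return transfers
-- ===== SOURCE B (Python) =====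
-- def _count_transfers(legs):
--     # Two-phase: collapse consecutive equal modes into segments, then count
--     # segment boundaries that land on bus/metro after a non-walk segment.
--     segments = []
--     for leg in legs:
--         m = leg['mode']
--         if not segments or segments[-1] != m:
--             segments.append(m)
--     return sum(1 for p, c in zip(segments, segments[1:])
--                if p != 'walk' and c in ('bus', 'metro'))
-- ===== Notes on version B (the rewrite author's own statement) =====
-- stated objective: alternative
-- what changed: Replaces the single stateful scan (current_mode carried through an if-chain) by a two-phase decomposition: first collapse consecutive equal modes into a segment list, then count adjacent segment pairs (prev != 'walk', cur in {'bus','metro'}); the explicit mode-inequality test disappears because every segment boundary is a mode switch.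
import Mathlib
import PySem

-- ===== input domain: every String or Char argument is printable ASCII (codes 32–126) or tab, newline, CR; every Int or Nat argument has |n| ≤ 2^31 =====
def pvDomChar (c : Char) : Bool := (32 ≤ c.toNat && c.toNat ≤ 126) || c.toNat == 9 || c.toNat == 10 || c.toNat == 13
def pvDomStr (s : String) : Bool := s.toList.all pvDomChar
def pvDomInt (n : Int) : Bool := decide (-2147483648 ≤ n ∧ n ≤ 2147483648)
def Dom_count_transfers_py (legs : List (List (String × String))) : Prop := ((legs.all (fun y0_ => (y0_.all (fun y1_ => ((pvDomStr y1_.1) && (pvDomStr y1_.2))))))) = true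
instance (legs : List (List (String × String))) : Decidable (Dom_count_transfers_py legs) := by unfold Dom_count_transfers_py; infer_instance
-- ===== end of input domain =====

-- B restructures A's stateful scan into collapse-consecutive-modes then count adjacent segment pairs; equal return values proved on legs whose dicts all carry a 'mode' key.

-- ===== PORT A =====
-- leg['mode'] (KeyError = none, excluded by Pre_; getD "" is a placeholder outside Pre_)
def pvMode (leg : List (String × String)) : String :=
  ((PySem.Dict.mk leg).get? "mode").getD ""

def count_transfers_py (legs : List (List (String × String))) : Int :=
  match legs with
  | [] => 0
  | first :: rest =>
    -- transfers = 0; current_mode = legs[0]['mode']; for leg in legs[1:]: …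
    (rest.foldl (fun (st : Int × String) leg =>
        let m := pvMode leg
        let transfers :=
          if m ≠ st.2 ∧ st.2 ≠ "walk" then
            (if m = "bus" ∨ m = "metro" then st.1 + 1 else st.1)
          else st.1
        (transfers, m)) (0, pvMode first)).1

-- ===== PORT B =====
-- segments: append leg's mode when it differs from the last collapsed mode
def pvSegments (legs : List (List (String × String))) : List String :=
  legs.foldl (fun segs leg =>
      let m := pvMode leg
      if segs = [] ∨ segs.getLast? ≠ some m then segs ++ [m] else segs) []

def count_transfers_py_alt (legs : List (List (String × String))) : Int :=
  let segs := pvSegments legs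
  (((segs.zip segs.tail).filter (fun pc => pc.1 ≠ "walk" ∧ (pc.2 = "bus" ∨ pc.2 = "metro"))).length : Int)

-- ===== PRECONDITION & SPEC =====
-- Pre_: every leg dict has the 'mode' key; A raises KeyError otherwise.
def Pre_count_transfers_py (legs : List (List (String × String))) : Prop :=
  ∀ leg ∈ legs, ((PySem.Dict.mk leg).get? "mode").isSome
instance (legs : List (List (String × String))) : Decidable (Pre_count_transfers_py legs) := by unfold Pre_count_transfers_py; infer_instance
def pvWitness_count_transfers_py : (List (List (String × String))) :=
  ([[("mode", "walk")], [("mode", "bus")], [("mode", "metro")]])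

def Spec_count_transfers_py (legs : List (List (String × String))) (out : Int) : Prop := out = count_transfers_py_alt legs
instance (legs : List (List (String × String))) (out : Int) : Decidable (Spec_count_transfers_py legs out) := by unfold Spec_count_transfers_py; infer_instance

-- ===== CLAIM (what is proved, stated in full; the proofs are below) =====
def Claim_equal_count_transfers_py : Prop := ∀ (legs : List (List (String × String))), Dom_count_transfers_py legs → Pre_count_transfers_py legs → Spec_count_transfers_py legs (count_transfers_py legs)

-- ===== LEMMAS AND PROOFS =====

-- recursive characterisation of the collapse
def pvCollapse : Option String → List String → List String
  | _, [] => []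
  | last, m :: ms => if last = some m then pvCollapse last ms else m :: pvCollapse (some m) ms

-- recursive characterisation of A's scan, on the list of modes
def pvACount : String → List String → Int
  | _, [] => 0
  | cm, m :: ms =>
    (if m ≠ cm ∧ cm ≠ "walk" ∧ (m = "bus" ∨ m = "metro") then 1 else 0) + pvACount m ms

-- B's pair count, on a segment list
def pvPairCount : List String → Int
  | [] => 0
  | [_] => 0
  | p :: c :: rest =>
    (if p ≠ "walk" ∧ (c = "bus" ∨ c = "metro") then 1 else 0) + pvPairCount (c :: rest)

theorem pvSegs_foldl (legs : List (List (String × String))) (acc : List String) :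
    legs.foldl (fun segs leg =>
        let m := pvMode leg
        if segs = [] ∨ segs.getLast? ≠ some m then segs ++ [m] else segs) acc
      = acc ++ pvCollapse acc.getLast? (legs.map pvMode) := by
  induction legs generalizing acc with
  | nil => simp [pvCollapse]
  | cons leg rest ih =>
    simp only [List.foldl_cons, List.map_cons, pvCollapse]
    by_cases h : acc.getLast? = some (pvMode leg)
    · have hne : acc ≠ [] := by intro he; simp [he] at h
      rw [if_neg (by simp [h, hne]), if_pos h, ih]
    · have hc : (acc = [] ∨ acc.getLast? ≠ some (pvMode leg)) := by
        by_cases he : acc = [] <;> simp [he, h]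
      rw [if_pos hc, if_neg h, ih, List.append_assoc]
      congr 1
      simp

theorem pvPairCount_zip (l : List String) :
    ((((l.zip l.tail).filter (fun pc => pc.1 ≠ "walk" ∧ (pc.2 = "bus" ∨ pc.2 = "metro"))).length : Int))
      = pvPairCount l := by
  induction l with
  | nil => simp [pvPairCount]
  | cons p t ih =>
    cases t with
    | nil => simp [pvPairCount]
    | cons c rest =>
      simp only [List.tail_cons, List.zip_cons_cons, List.filter_cons]
      by_cases h : p ≠ "walk" ∧ (c = "bus" ∨ c = "metro")
      · rw [if_pos (by simpa using h)]
        simp only [List.length_cons, pvPairCount, if_pos h]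
        rw [← ih]
        simp [List.tail_cons]
        omega
      · rw [if_neg (by simpa using h)]
        simp only [pvPairCount, if_neg h]
        rw [← ih]
        simp [List.tail_cons]

theorem pvA_foldl (legs : List (List (String × String))) (t : Int) (cm : String) :
    (legs.foldl (fun (st : Int × String) leg =>
        let m := pvMode leg
        let transfers :=
          if m ≠ st.2 ∧ st.2 ≠ "walk" then
            (if m = "bus" ∨ m = "metro" then st.1 + 1 else st.1)
          else st.1
        (transfers, m)) (t, cm)).1 = t + pvACount cm (legs.map pvMode) := by
  induction legs generalizing t cm with
  | nil => simp [pvACount]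
  | cons leg rest ih =>
    simp only [List.foldl_cons, List.map_cons, pvACount, ih]
    by_cases h1 : pvMode leg ≠ cm ∧ cm ≠ "walk"
    · by_cases h2 : pvMode leg = "bus" ∨ pvMode leg = "metro"
      · rw [if_pos h1, if_pos h2, if_pos ⟨h1.1, h1.2, h2⟩]; ring
      · rw [if_pos h1, if_neg h2, if_neg (by tauto)]; ring
    · rw [if_neg h1, if_neg (by tauto)]; ring

theorem pvMain (ms : List String) (cm : String) :
    pvACount cm ms = pvPairCount (cm :: pvCollapse (some cm) ms) := by
  induction ms generalizing cm with
  | nil => simp [pvACount, pvCollapse, pvPairCount]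
  | cons m ms ih =>
    simp only [pvACount, pvCollapse]
    by_cases h : cm = m
    · subst h
      rw [if_pos rfl, if_neg (by simp), ih]
      simp
    · have h' : m ≠ cm := Ne.symm h
      rw [show (if some cm = some m then pvCollapse (some cm) ms else m :: pvCollapse (some m) ms)
            = m :: pvCollapse (some m) ms from if_neg (by simp [h])]
      simp only [pvPairCount]
      rw [ih m]
      congr 1
      split_ifs with h1 h2 <;> first | rfl | tauto

-- ===== VERDICT (by name: the statement is the Claim_ definition above) =====
theorem count_transfers_py_spec : Claim_equal_count_transfers_py := by
  intro legs _ _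
  unfold Spec_count_transfers_py count_transfers_py count_transfers_py_alt pvSegments
  cases legs with
  | nil => simp
  | cons first rest =>
    simp only
    rw [pvSegs_foldl, pvA_foldl]
    simp only [List.map_cons, pvCollapse, List.getLast?_nil, List.nil_append,
      reduceCtorEq, not_false_eq_true, if_neg, zero_add]
    rw [pvPairCount_zip, pvMain]
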